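-- pv_equiv track=rewrite | github.com/tnsrc/sample_sql_analysis | adaptive_chunked_analyzer.py | _find_business_function_subdivisions
-- ===== SOURCE A (Python) =====
-- from typing import List, Dict, Any, Tuple, Optional, Set
--
-- def _find_business_function_subdivisions(chunk_lines: List[Dict]) -> List[int]:
--     """Find subdivision points based on business function changes"""
--     points = []
--     current_functions = set()
--
--     for i, line_data in enumerate(chunk_lines):
--         line_functions = set(line_data.get('business_functions', []))
--
--         if line_functions and line_functions != current_functions:
--             if current_functions:  # Not the first function change
--                 points.append(i)
--             current_functions = line_functions
--
--     return points
-- ===== SOURCE B (Python) =====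
-- def _find_business_function_subdivisions(chunk_lines):
--     """Two phases: (1) collect (index, function-set) for lines whose set is
--     non-empty; (2) compare adjacent entries of that list pairwise, recording
--     the index wherever the set differs from the previous non-empty one."""
--     nonempty = []
--     for i, line_data in enumerate(chunk_lines):
--         s = set(line_data.get('business_functions', []))
--         if s:
--             nonempty.append((i, s))
--     return [ci for (pi, ps), (ci, cs) in zip(nonempty, nonempty[1:]) if cs != ps]
-- ===== Notes on version B (the rewrite author's own statement) =====
-- stated objective: alternative
-- what changed: Replaces A's single stateful scan (current-set register with a first-change guard) by a two-phase decomposition: first filter out lines with an empty function set, then emit the index of every adjacent filtered pair whose sets differ.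
import Mathlib
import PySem

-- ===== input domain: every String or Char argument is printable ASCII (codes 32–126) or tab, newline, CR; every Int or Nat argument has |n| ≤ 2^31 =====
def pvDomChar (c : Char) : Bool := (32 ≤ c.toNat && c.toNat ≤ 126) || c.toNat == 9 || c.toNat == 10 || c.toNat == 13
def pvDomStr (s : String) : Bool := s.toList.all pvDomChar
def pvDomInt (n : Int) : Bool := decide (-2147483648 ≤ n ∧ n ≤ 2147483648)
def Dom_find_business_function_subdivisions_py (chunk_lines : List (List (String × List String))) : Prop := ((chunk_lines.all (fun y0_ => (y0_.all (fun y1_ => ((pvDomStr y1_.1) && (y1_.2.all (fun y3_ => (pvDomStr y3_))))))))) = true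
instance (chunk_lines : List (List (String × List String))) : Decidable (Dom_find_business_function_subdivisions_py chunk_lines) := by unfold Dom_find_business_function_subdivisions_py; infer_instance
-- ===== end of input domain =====

-- B replaces A's stateful one-pass scan by a filter-then-adjacent-pairs decomposition (alternative structure, same cost).

-- ===== PORT A =====
-- the loop body of A: state = (points, current_functions)
def pvStepA (st : List Int × PySem.Set String) (p : Int × List (String × List String)) :
    List Int × PySem.Set String :=
  let lf : PySem.Set String := PySem.Set.ofList ((PySem.Dict.mk p.2).getD "business_functions" [])
  if !lf.isEmpty && !(PySem.Set.equal lf st.2) then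
    ((if !st.2.isEmpty then st.1 ++ [p.1] else st.1), lf)
  else st

def find_business_function_subdivisions_py (chunk_lines : List (List (String × List String))) : List Int :=
  ((PySem.List.enumerate chunk_lines).foldl pvStepA ([], [])).1

-- ===== PORT B =====
def find_business_function_subdivisions_py_alt (chunk_lines : List (List (String × List String))) : List Int :=
  let nonempty :=
    ((PySem.List.enumerate chunk_lines).map
        (fun p => (p.1, PySem.Set.ofList ((PySem.Dict.mk p.2).getD "business_functions" [])))).filter
      (fun q => !q.2.isEmpty)
  (nonempty.zip nonempty.tail).filterMap
    (fun pr => if PySem.Set.equal pr.2.2 pr.1.2 then none else some pr.2.1)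

-- ===== PRECONDITION & SPEC =====
def Spec_find_business_function_subdivisions_py (chunk_lines : List (List (String × List String))) (out : List Int) : Prop := out = find_business_function_subdivisions_py_alt chunk_lines
instance (chunk_lines : List (List (String × List String))) (out : List Int) : Decidable (Spec_find_business_function_subdivisions_py chunk_lines out) := by unfold Spec_find_business_function_subdivisions_py; infer_instance

-- ===== CLAIM (what is proved, stated in full; the proofs are below) =====
def Claim_equal_find_business_function_subdivisions_py : Prop := ∀ (chunk_lines : List (List (String × List String))), Dom_find_business_function_subdivisions_py chunk_lines → Spec_find_business_function_subdivisions_py chunk_lines (find_business_function_subdivisions_py chunk_lines)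

-- ===== LEMMAS AND PROOFS =====

-- B's adjacent-pair scan, written structurally (compares each entry to the literal previous entry)
def pvPairs : List (Int × PySem.Set String) → List Int
  | [] => []
  | [_] => []
  | a :: b :: rest =>
    if PySem.Set.equal b.2 a.2 then pvPairs (b :: rest) else b.1 :: pvPairs (b :: rest)

-- A's continuation after the first non-empty set: compares each entry to the register `cur`
def pvChain (cur : PySem.Set String) : List (Int × PySem.Set String) → List Int
  | [] => []
  | a :: rest =>
    if PySem.Set.equal a.2 cur then pvChain cur rest else a.1 :: pvChain a.2 rest

theorem pvPairs_eq_zip (l : List (Int × PySem.Set String)) :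
    (l.zip l.tail).filterMap
      (fun pr => if PySem.Set.equal pr.2.2 pr.1.2 then none else some pr.2.1) = pvPairs l := by
  induction l with
  | nil => rfl
  | cons a l ih =>
    cases l with
    | nil => rfl
    | cons b rest =>
      have ht : (b :: rest).tail = rest := rfl
      rw [ht] at ih
      by_cases heq : PySem.Set.equal b.2 a.2 = true <;>
        simp [List.zip_cons_cons, heq, pvPairs, ih]

theorem pvEqual_symm_trans {a c c' : PySem.Set String}
    (h : PySem.Set.equal c c' = true) :
    PySem.Set.equal a c = PySem.Set.equal a c' := by
  rw [PySem.Set.equal_iff] at h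
  by_cases h1 : PySem.Set.equal a c = true
  · rw [h1]
    symm
    rw [PySem.Set.equal_iff] at h1 ⊢
    intro x; rw [h1 x, h x]
  · rw [Bool.eq_false_iff.mpr h1]
    symm
    rw [Bool.eq_false_iff]
    intro h2
    apply h1
    rw [PySem.Set.equal_iff] at h2 ⊢
    intro x; rw [h2 x, h x]

theorem pvChain_congr (c c' : PySem.Set String) (h : PySem.Set.equal c c' = true)
    (l : List (Int × PySem.Set String)) : pvChain c l = pvChain c' l := by
  induction l with
  | nil => rfl
  | cons a rest ih =>
    simp only [pvChain, pvEqual_symm_trans h, ih]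

theorem pvChain_eq_pairs (prev : Int × PySem.Set String) (l : List (Int × PySem.Set String)) :
    pvChain prev.2 l = pvPairs (prev :: l) := by
  induction l generalizing prev with
  | nil => rfl
  | cons a rest ih =>
    simp only [pvChain, pvPairs]
    by_cases h : PySem.Set.equal a.2 prev.2 = true
    · rw [if_pos h, if_pos h, ← ih a, pvChain_congr _ _ h]
    · rw [if_neg h, if_neg h, ih a]

-- empty-set facts
theorem pvEqual_empty {lf : PySem.Set String} (h : lf.isEmpty = false) :
    PySem.Set.equal lf [] = false := by
  rw [Bool.eq_false_iff]
  intro h2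
  rw [PySem.Set.equal_iff] at h2
  cases lf with
  | nil => simp at h
  | cons x t => exact absurd ((h2 x).mp (List.mem_cons_self)) (List.not_mem_nil)

-- the filtered list of B, starting at index s
def pvF (xs : List (List (String × List String))) (s : Int) : List (Int × PySem.Set String) :=
  ((PySem.List.enumerate xs s).map
      (fun p => (p.1, PySem.Set.ofList ((PySem.Dict.mk p.2).getD "business_functions" [])))).filter
    (fun q => !q.2.isEmpty)

-- main invariant for A's fold
theorem pvMain (xs : List (List (String × List String))) (s : Int) (pts : List Int)
    (cur : PySem.Set String) :
    ((PySem.List.enumerate xs s).foldl pvStepA (pts, cur)).1 =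
      pts ++ (if cur.isEmpty then pvPairs (pvF xs s) else pvChain cur (pvF xs s)) := by
  induction xs generalizing s pts cur with
  | nil => simp [PySem.List.enumerate_nil, pvF, pvPairs, pvChain]
  | cons x xs ih =>
    rw [PySem.List.enumerate_cons]
    have hF : pvF (x :: xs) s =
        (if (!(PySem.Set.ofList ((PySem.Dict.mk x).getD "business_functions" [])).isEmpty) = true
         then [(s, PySem.Set.ofList ((PySem.Dict.mk x).getD "business_functions" []))] else []) ++
          pvF xs (s + 1) := by
      simp [pvF, PySem.List.enumerate_cons, List.filter_cons]
      split <;> simp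
    set lf := PySem.Set.ofList ((PySem.Dict.mk x).getD "business_functions" []) with hlf
    simp only [List.foldl_cons]
    by_cases hne : lf.isEmpty = true
    · -- empty line set: step is identity, filtered list unchanged
      have hstep : pvStepA (pts, cur) (s, x) = (pts, cur) := by
        simp [pvStepA, ← hlf, hne]
      rw [hstep, ih]
      rw [hF]
      simp [hne]
    · replace hne : lf.isEmpty = false := Bool.eq_false_iff.mpr hne
      rw [hF]; simp only [hne, Bool.not_false, if_pos rfl]
      by_cases hcur : cur.isEmpty = true
      · -- first non-empty set: register it, no point emitted
        have hcur' : cur = [] := by cases cur <;> simp_all [List.isEmpty]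
        have hstep : pvStepA (pts, cur) (s, x) = (pts, lf) := by
          simp [pvStepA, ← hlf, hne, hcur', pvEqual_empty hne]
        rw [hstep, ih, if_neg (by simp [hne]), hcur]
        rw [if_pos trivial, if_pos rfl, List.singleton_append,
          ← pvChain_eq_pairs (s, lf)]
      · replace hcur : cur.isEmpty = false := Bool.eq_false_iff.mpr hcur
        simp only [hcur]
        by_cases heq : PySem.Set.equal lf cur = true
        · -- same set as register: skip, keep register
          have hstep : pvStepA (pts, cur) (s, x) = (pts, cur) := by
            simp [pvStepA, ← hlf, heq]
          rw [hstep, ih, if_neg (by simp [hcur]), if_pos trivial, List.singleton_append]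
          simp [pvChain, heq]
        · -- changed set: emit index, update register
          have hstep : pvStepA (pts, cur) (s, x) = (pts ++ [s], lf) := by
            simp [pvStepA, ← hlf, hne, hcur, Bool.eq_false_iff.mpr heq]
          rw [hstep, ih, if_neg (by simp [hne]), if_pos trivial, List.singleton_append]
          simp [pvChain, heq]

-- ===== VERDICT (by name: the statement is the Claim_ definition above) =====
theorem find_business_function_subdivisions_py_spec : Claim_equal_find_business_function_subdivisions_py := by
  intro chunk_lines _
  unfold Spec_find_business_function_subdivisions_py
  unfold find_business_function_subdivisions_py find_business_function_subdivisions_py_alt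
  rw [pvMain]
  simp only [List.isEmpty_nil, List.nil_append, if_true]
  rw [← pvPairs_eq_zip]
  rfl
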